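-- pv_equiv track=rewrite | github.com/RubenPinto-2000/PredictingCorporateBankruptcy_AP25 | src/data_column_mapping.py | detect_duplicate_mappings
-- ===== SOURCE A (Python) =====
-- def detect_duplicate_mappings(mapping_dict):
--     """
--     Identify duplicated target names in a column-mapping dictionary.
--     This allows subsequent removal of duplicate mappings to avoid multicollinearity.
--     """
--     value_to_keys = {}
--     for key, value in mapping_dict.items():
--         # Skip keys that are not financial ratios
--         if (key in ["year", "class"]):
--             continue
--         if (value not in value_to_keys):
--             value_to_keys[value] = []
--         value_to_keys[value].append(key)
--
--     # Return only duplicates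
--     duplicates = {value: keys for value, keys in value_to_keys.items() if len(keys) > 1}
--     return duplicates
-- ===== SOURCE B (Python) =====
-- def detect_duplicate_mappings(mapping_dict):
--     """
--     Identify duplicated target names in a column-mapping dictionary.
--     Two passes: first count how many eligible keys map to each value,
--     then collect keys only for values whose count exceeds one.
--     """
--     counts = {}
--     for key, value in mapping_dict.items():
--         if key in ["year", "class"]:
--             continue
--         counts[value] = counts.get(value, 0) + 1
--     duplicates = {}
--     for key, value in mapping_dict.items():
--         if key in ["year", "class"]:
--             continue
--         if counts[value] > 1:
--             duplicates.setdefault(value, []).append(key)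
--     return duplicates
-- ===== Notes on version B (the rewrite author's own statement) =====
-- stated objective: alternative
-- what changed: Replaces A's build-full-group-dict-then-filter-comprehension with two differently-shaped passes: a counting pass over the values, then a collection pass that only ever creates list entries for values already known to be duplicated.
import Mathlib
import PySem

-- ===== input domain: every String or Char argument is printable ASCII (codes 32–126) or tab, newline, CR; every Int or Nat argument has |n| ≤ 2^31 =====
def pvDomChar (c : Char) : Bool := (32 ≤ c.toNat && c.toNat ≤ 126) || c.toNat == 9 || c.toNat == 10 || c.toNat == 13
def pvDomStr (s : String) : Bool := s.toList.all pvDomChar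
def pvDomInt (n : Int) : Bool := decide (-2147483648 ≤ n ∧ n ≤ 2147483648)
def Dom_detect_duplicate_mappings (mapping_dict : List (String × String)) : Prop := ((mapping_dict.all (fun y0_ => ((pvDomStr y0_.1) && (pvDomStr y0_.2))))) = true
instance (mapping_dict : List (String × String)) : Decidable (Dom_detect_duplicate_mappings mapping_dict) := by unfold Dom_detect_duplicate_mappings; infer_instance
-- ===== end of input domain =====

-- B replaces A's build-full-group-dict-then-filter comprehension with a counting pass followed by a
-- collection pass that only creates entries for values already known duplicated (objective: alternative).

-- ===== PORT A =====
-- value_to_keys: Python's `if value not in d: d[value] = []` followed by `d[value].append(key)`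
-- is the overwrite-in-place insert of (old list ++ [key])
def detect_duplicate_mappings (mapping_dict : List (String × String)) : List (String × List String) :=
  let value_to_keys : PySem.Dict String (List String) :=
    mapping_dict.foldl (fun d kv =>
      if kv.1 = "year" ∨ kv.1 = "class" then d
      else d.insert kv.2 (d.getD kv.2 [] ++ [kv.1])) PySem.Dict.empty
  -- {value: keys for value, keys in value_to_keys.items() if len(keys) > 1}
  value_to_keys.items.filter (fun p => p.2.length > 1)

-- ===== PORT B =====
-- pass 1: counts[value] = counts.get(value, 0) + 1
-- pass 2: duplicates.setdefault(value, []).append(key) = overwrite-in-place insert of (old ++ [key]);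
-- counts[value] is always present when read (pass 1 saw the same pair), so getD 0 is exact there
def detect_duplicate_mappings_alt (mapping_dict : List (String × String)) : List (String × List String) :=
  let counts : PySem.Dict String Int :=
    mapping_dict.foldl (fun c kv =>
      if kv.1 = "year" ∨ kv.1 = "class" then c
      else c.insert kv.2 (c.getD kv.2 0 + 1)) PySem.Dict.empty
  let duplicates : PySem.Dict String (List String) :=
    mapping_dict.foldl (fun r kv =>
      if kv.1 = "year" ∨ kv.1 = "class" then r
      else if counts.getD kv.2 0 > 1 then r.insert kv.2 (r.getD kv.2 [] ++ [kv.1]) else r)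
      PySem.Dict.empty
  duplicates.items

-- ===== PRECONDITION & SPEC =====
def Spec_detect_duplicate_mappings (mapping_dict : List (String × String)) (out : List (String × List String)) : Prop := out = detect_duplicate_mappings_alt mapping_dict
instance (mapping_dict : List (String × String)) (out : List (String × List String)) : Decidable (Spec_detect_duplicate_mappings mapping_dict out) := by unfold Spec_detect_duplicate_mappings; infer_instance

-- ===== CLAIM (what is proved, stated in full; the proofs are below) =====
def Claim_equal_detect_duplicate_mappings : Prop := ∀ (mapping_dict : List (String × String)), Dom_detect_duplicate_mappings mapping_dict → Spec_detect_duplicate_mappings mapping_dict (detect_duplicate_mappings mapping_dict)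

-- ===== LEMMAS AND PROOFS =====

-- the eligible pairs (keys other than "year"/"class"): the shared shape of all three loops
def pvElig (mapping_dict : List (String × String)) : List (String × String) :=
  mapping_dict.filter (fun kv => ¬(kv.1 = "year" ∨ kv.1 = "class"))

-- A's grouping step (= B's collection step when the guard fires)
def pvStepA (d : PySem.Dict String (List String)) (kv : String × String) : PySem.Dict String (List String) :=
  d.insert kv.2 (d.getD kv.2 [] ++ [kv.1])

-- a loop that skips "year"/"class" is the plain loop over the eligible pairs
lemma pv_skip {σ : Type} (f : σ → (String × String) → σ) (l : List (String × String)) (init : σ) :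
    l.foldl (fun d kv => if kv.1 = "year" ∨ kv.1 = "class" then d else f d kv) init
      = (pvElig l).foldl f init := by
  induction l generalizing init with
  | nil => rfl
  | cons kv t ih =>
    simp only [List.foldl_cons, pvElig, List.filter_cons]
    by_cases h : kv.1 = "year" ∨ kv.1 = "class"
    · rw [if_pos h]
      have hd : (decide ¬(kv.1 = "year" ∨ kv.1 = "class")) = false := by simp [h]
      rw [hd]
      simpa [pvElig] using ih init
    · rw [if_neg h]
      have hd : (decide ¬(kv.1 = "year" ∨ kv.1 = "class")) = true := by simp [h]
      rw [hd]
      simpa [pvElig] using ih (f init kv)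

-- B's counting pass computes the multiplicity of each value among the eligible pairs
lemma pv_cnt_char (m : List (String × String)) (v : String) :
    ((pvElig m).foldl (fun (c : PySem.Dict String Int) kv => c.insert kv.2 (c.getD kv.2 0 + 1))
      PySem.Dict.empty).getD v 0
    = (((pvElig m).map Prod.snd).count v : Int) := by
  have : (pvElig m).foldl (fun (c : PySem.Dict String Int) kv => c.insert kv.2 (c.getD kv.2 0 + 1)) PySem.Dict.empty
      = ((pvElig m).map Prod.snd).foldl (fun (c : PySem.Dict String Int) x => c.insert x (c.getD x 0 + 1)) PySem.Dict.empty := by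
    rw [List.foldl_map]
  rw [this, PySem.Dict.getD_foldl_insert_add_one]
  simp

-- lookup through a key-determined filter of the items of a nodup-keyed dict is unchanged
lemma pv_getD_filter (dA dB : PySem.Dict String (List String)) (q : String → Bool)
    (hnd : dA.keys.Nodup) (hB : dB.items = dA.items.filter (fun p => q p.1)) (v : String)
    (hv : q v = true) : dB.getD v [] = dA.getD v [] := by
  have hkeysB : dB.keys = dB.items.map Prod.fst := rfl
  have hkeysA : dA.keys = dA.items.map Prod.fst := rfl
  have hsub : dB.keys.Sublist dA.keys := by
    rw [hkeysB, hkeysA, hB]; exact List.filter_sublist.map _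
  have hndB : dB.keys.Nodup := hsub.nodup hnd
  by_cases hm : v ∈ dA.keys
  · obtain ⟨p, hp, hfst⟩ := List.mem_map.mp (hkeysA ▸ hm)
    obtain ⟨k, ks⟩ := p
    cases hfst
    have h1 : dA.getD k [] = ks := PySem.Dict.getD_of_mem_items dA hp hnd []
    have hpB : (k, ks) ∈ dB.items := by
      rw [hB]; exact List.mem_filter.mpr ⟨hp, by simpa using hv⟩
    have h2 : dB.getD k [] = ks := PySem.Dict.getD_of_mem_items dB hpB hndB []
    rw [h1, h2]
  · have hmB : v ∉ dB.keys := fun h => hm (hsub.subset h)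
    have g1 : dA.get? v = none := (PySem.Dict.get?_eq_none_iff_not_mem_keys dA v).mpr hm
    have g2 : dB.get? v = none := (PySem.Dict.get?_eq_none_iff_not_mem_keys dB v).mpr hmB
    rw [PySem.Dict.getD_of_get?_eq_none dB [] g2, PySem.Dict.getD_of_get?_eq_none dA [] g1]

-- membership of a key satisfying the filter predicate is unchanged by the filter
lemma pv_contains_filter (dA dB : PySem.Dict String (List String)) (q : String → Bool)
    (hB : dB.items = dA.items.filter (fun p => q p.1)) (v : String) (hv : q v = true) :
    dB.contains v = dA.contains v := by
  have hsubI : dB.items ⊆ dA.items := by rw [hB]; exact List.filter_sublist.subset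
  rw [PySem.Dict.contains_eq_decide_mem_keys, PySem.Dict.contains_eq_decide_mem_keys]
  have hkB : dB.keys = dB.items.map Prod.fst := rfl
  have hkA : dA.keys = dA.items.map Prod.fst := rfl
  congr 1
  apply propext
  constructor
  · intro h
    exact hkA ▸ List.map_subset Prod.fst hsubI (hkB ▸ h)
  · intro h
    obtain ⟨p, hp, hfst⟩ := List.mem_map.mp (hkA ▸ h)
    rw [hkB, hB]
    exact List.mem_map.mpr ⟨p, List.mem_filter.mpr ⟨hp, by simpa [hfst] using hv⟩, hfst⟩

-- a key absent from the unfiltered dict is absent from the filtered one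
lemma pv_contains_filter_false (dA dB : PySem.Dict String (List String)) (q : String → Bool)
    (hB : dB.items = dA.items.filter (fun p => q p.1)) (v : String)
    (h : dA.contains v = false) : dB.contains v = false := by
  have hsubI : dB.items ⊆ dA.items := by rw [hB]; exact List.filter_sublist.subset
  rw [PySem.Dict.contains_eq_decide_mem_keys] at h ⊢
  simp only [decide_eq_false_iff_not] at h ⊢
  intro hm
  exact h (List.map_subset Prod.fst hsubI hm)

lemma pv_main (cnt : String → Int) (l : List (String × String))
    (dA dB : PySem.Dict String (List String))
    (hnd : dA.keys.Nodup)
    (h1 : ∀ v, cnt v = ((dA.getD v []).length : Int) + ((l.map Prod.snd).count v : Int))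
    (h2 : dB.items = dA.items.filter (fun p => decide (cnt p.1 > 1))) :
    ((l.foldl pvStepA dA).items).filter (fun p => p.2.length > 1) =
    (l.foldl (fun r kv => if cnt kv.2 > 1 then pvStepA r kv else r) dB).items := by
  induction l generalizing dA dB with
  | nil =>
    simp only [List.foldl_nil]
    rw [h2]
    apply List.filter_congr
    intro p hp
    have hgd : dA.getD p.1 [] = p.2 := PySem.Dict.getD_of_mem_items dA (by simpa using hp) hnd []
    have hc := h1 p.1
    simp only [List.map_nil, List.count_nil, Nat.cast_zero, add_zero, hgd] at hc
    simp only [decide_eq_decide, hc]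
    omega
  | cons kv t ih =>
    obtain ⟨k, v⟩ := kv
    simp only [List.foldl_cons]
    have hnd' : (pvStepA dA (k, v)).keys.Nodup := PySem.Dict.nodup_keys_insert dA v _ hnd
    have h1' : ∀ w, cnt w = (((pvStepA dA (k, v)).getD w []).length : Int) + ((t.map Prod.snd).count w : Int) := by
      intro w
      have h0 := h1 w
      simp only [List.map_cons, List.count_cons] at h0
      simp only [pvStepA, PySem.Dict.getD_insert]
      by_cases hw : w = v
      · subst hw
        rw [if_pos rfl]
        simp at h0 ⊢
        omega
      · rw [if_neg hw]
        simp [Ne.symm hw] at h0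
        omega
    by_cases hcv : cnt v > 1
    · rw [if_pos hcv]
      have hq : decide (cnt v > 1) = true := by simpa using hcv
      refine ih (pvStepA dA (k, v)) (pvStepA dB (k, v)) hnd' h1' ?_
      cases hc : dA.contains v with
      | false =>
        have hcB := pv_contains_filter_false dA dB (fun s => decide (cnt s > 1)) h2 v hc
        simp only [pvStepA]
        rw [PySem.Dict.items_insert_of_not_contains dB _ hcB,
            PySem.Dict.items_insert_of_not_contains dA _ hc,
            PySem.Dict.getD_of_not_contains dB [] hcB,
            PySem.Dict.getD_of_not_contains dA [] hc,
            List.filter_append, h2]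
        simp [hcv]
      | true =>
        have hcB : dB.contains v = true := by
          rw [pv_contains_filter dA dB (fun s => decide (cnt s > 1)) h2 v hq, hc]
        have hgd := pv_getD_filter dA dB (fun s => decide (cnt s > 1)) hnd h2 v hq
        simp only [pvStepA]
        rw [PySem.Dict.items_insert_of_contains dA _ hc,
            PySem.Dict.items_insert_of_contains dB _ hcB,
            h2, hgd, List.filter_map]
        congr 1
        apply List.filter_congr
        intro p hp
        by_cases hpv : p.1 = v
        · simp [Function.comp, hpv, hq]
        · have : (p.1 == v) = false := by simpa using hpv
          simp [Function.comp, this]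
    · rw [if_neg hcv]
      refine ih (pvStepA dA (k, v)) dB hnd' h1' ?_
      have hqf : decide (cnt v > 1) = false := by simpa using hcv
      cases hc : dA.contains v with
      | false =>
        simp only [pvStepA]
        rw [PySem.Dict.items_insert_of_not_contains dA _ hc, List.filter_append, h2]
        simp [hqf]
      | true =>
        simp only [pvStepA]
        rw [PySem.Dict.items_insert_of_contains dA _ hc, List.filter_map, h2]
        have hfc : dA.items.filter ((fun p => decide (cnt p.1 > 1)) ∘
            (fun p => if (p.1 == v) = true then (v, dA.getD v [] ++ [k]) else p)) =
            dA.items.filter (fun p => decide (cnt p.1 > 1)) := by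
          apply List.filter_congr
          intro p hp
          by_cases hpv : p.1 = v
          · simp [Function.comp, hpv, hqf]
          · have : (p.1 == v) = false := by simpa using hpv
            simp [Function.comp, this]
        rw [hfc]
        symm
        conv_rhs => rw [← List.map_id (dA.items.filter (fun p => decide (cnt p.1 > 1)))]
        apply List.map_congr_left
        intro p hp
        have hq' : decide (cnt p.1 > 1) = true := (List.mem_filter.mp hp).2
        have hpv : (p.1 == v) = false := by
          simp only [beq_eq_false_iff_ne, ne_eq]
          intro h; rw [h] at hq'; simp [hqf] at hq'
        simp [hpv]

theorem pv_equiv (m : List (String × String)) :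
    detect_duplicate_mappings m = detect_duplicate_mappings_alt m := by
  simp only [detect_duplicate_mappings, detect_duplicate_mappings_alt]
  rw [pv_skip, pv_skip, pv_skip]
  simp only [pv_cnt_char]
  exact pv_main (fun w => (((pvElig m).map Prod.snd).count w : Int)) (pvElig m)
    PySem.Dict.empty PySem.Dict.empty PySem.Dict.nodup_keys_empty
    (fun v => by simp [PySem.Dict.getD_empty]) rfl

-- ===== VERDICT (by name: the statement is the Claim_ definition above) =====
theorem detect_duplicate_mappings_spec : Claim_equal_detect_duplicate_mappings := by
  intro m _
  unfold Spec_detect_duplicate_mappings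
  exact pv_equiv m
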